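-- pv_equiv track=rewrite | github.com/gitmapd/gitmapd.github.io | size.py | componente_mais_frequente
-- ===== SOURCE A (Python) =====
-- from collections import defaultdict, Counter
--
-- def componente_mais_frequente(grafo):
--     visitado = set()
--
--     def dfs(no):
--         stack = [no]
--         tamanho = 0
--         while stack:
--             atual = stack.pop()
--             if atual not in visitado:
--                 visitado.add(atual)
--                 tamanho += 1
--                 stack.extend(grafo[atual])
--         return tamanho
--
--     tamanhos = []
--     for no in grafo:
--         if no not in visitado:
--             tamanhos.append(dfs(no))
--
--     frequencias = Counter(tamanhos)
--     max_frequencia = max(frequencias.values())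
--
--     # Obter os tamanhos com frequência máxima
--     candidatos = [t for t, f in frequencias.items() if f == max_frequencia]
--     return max(candidatos)
-- ===== SOURCE B (Python) =====
-- def componente_mais_frequente(grafo):
--     visitado = set()
--     tamanhos = []
--     for no in grafo:
--         if no in visitado:
--             continue
--         visitado.add(no)
--         tamanho = 1
--         fronteira = [no]
--         while fronteira:
--             proxima = []
--             for u in fronteira:
--                 for v in grafo[u]:
--                     if v not in visitado:
--                         visitado.add(v)
--                         tamanho += 1
--                         proxima.append(v)
--             fronteira = proxima
--         tamanhos.append(tamanho)
--     frequencias = {}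
--     for t in tamanhos:
--         frequencias[t] = frequencias.get(t, 0) + 1
--     melhor = None
--     for t, f in frequencias.items():
--         if melhor is None or f > melhor[1] or (f == melhor[1] and t > melhor[0]):
--             melhor = (t, f)
--     return melhor[0]
-- ===== Notes on version B (the rewrite author's own statement) =====
-- stated objective: alternative
-- what changed: The per-node iterative DFS with an explicit pop-from-stack loop (nodes marked when popped, possibly sitting on the stack many times) is replaced by a layered frontier flood (BFS by levels, nodes marked once when first discovered), and the Counter/max-frequency/filter/max tail is replaced by a single lexicographic (frequency, size) maximum pass over the frequency dict.
import Mathlib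
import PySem

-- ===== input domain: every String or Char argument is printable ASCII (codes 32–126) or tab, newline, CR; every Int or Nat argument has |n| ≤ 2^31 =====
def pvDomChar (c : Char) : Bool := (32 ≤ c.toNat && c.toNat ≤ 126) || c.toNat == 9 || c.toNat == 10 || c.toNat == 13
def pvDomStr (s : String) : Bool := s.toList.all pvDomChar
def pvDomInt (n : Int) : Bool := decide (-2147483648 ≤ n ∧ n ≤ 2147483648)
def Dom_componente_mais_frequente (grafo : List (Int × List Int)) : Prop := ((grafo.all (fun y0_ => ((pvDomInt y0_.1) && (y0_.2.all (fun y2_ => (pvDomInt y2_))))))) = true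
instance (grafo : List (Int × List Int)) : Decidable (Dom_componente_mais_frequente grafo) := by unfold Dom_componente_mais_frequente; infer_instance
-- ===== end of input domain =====

-- B replaces A's per-node pop-from-stack DFS by a layered frontier flood (mark on first
-- discovery) and replaces the Counter/max/filter/max tail by one lexicographic
-- (frequency, size) maximum pass; equivalent on non-empty graphs whose neighbour lists
-- only mention existing keys (elsewhere the Python raises).

-- ===== PORT A =====
-- grafo[x]: total form; Python raises KeyError for a missing key — those inputs are outside Pre_
def pvAdj (grafo : List (Int × List Int)) (x : Int) : List Int :=
  (PySem.Dict.mk grafo).getD x []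

-- 'for no in grafo': the dict's keys in insertion order
def pvKeys (grafo : List (Int × List Int)) : List Int :=
  (PySem.Dict.mk grafo).keys

-- needed by pvDfsA's decreasing_by, so it stays above the port
theorem pvFilter_notMem_length_lt (K vis : List Int) (a : Int) (hK : a ∈ K) (ha : a ∉ vis) :
    (K.filter (fun k => !decide (k ∈ PySem.Set.add vis a))).length
      < (K.filter (fun k => !decide (k ∈ vis))).length := by
  have hsub : (K.filter (fun k => !decide (k ∈ PySem.Set.add vis a))).Sublist
      (K.filter (fun k => !decide (k ∈ vis))) := by
    apply List.monotone_filter_right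
    intro x hx
    simp only [Bool.not_eq_eq_eq_not, Bool.not_true, decide_eq_false_iff_not,
      PySem.Set.mem_add] at hx ⊢
    exact fun h => hx (Or.inl h)
  rcases hsub.length_le.lt_or_eq with h | h
  · exact h
  · exfalso
    have heq := hsub.eq_of_length h
    have ha' : a ∈ K.filter (fun k => !decide (k ∈ vis)) := by
      simp [List.mem_filter, hK, ha]
    rw [← heq] at ha'
    simp [List.mem_filter, PySem.Set.mem_add] at ha'

-- A's inner dfs: while stack: atual = stack.pop(); …  — the Lean list keeps the Python
-- stack REVERSED (head = Python's top), so pop = head and stack.extend(nbrs) prepends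
-- nbrs.reverse; tamanho is the running count t
def pvDfsA (grafo : List (Int × List Int)) (stack : List Int) (vis : PySem.Set Int)
    (t : Int) : Int × PySem.Set Int :=
  match stack with
  | [] => (t, vis)
  | atual :: rest =>
    if atual ∈ vis then
      pvDfsA grafo rest vis t
    else
      pvDfsA grafo ((pvAdj grafo atual).reverse ++ rest) (PySem.Set.add vis atual) (t + 1)
termination_by (((pvKeys grafo).filter (fun k => !decide (k ∈ vis))).length, stack.length)
decreasing_by
  · exact Prod.Lex.right _ (Nat.lt_succ_self _)
  · by_cases hk : atual ∈ pvKeys grafo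
    · exact Prod.Lex.left _ _ (pvFilter_notMem_length_lt _ _ _ hk (by assumption))
    · have hadj : pvAdj grafo atual = [] := by
        have : (PySem.Dict.mk grafo).get? atual = none := by
          rw [PySem.Dict.get?_eq_none_iff_not_mem_keys]
          exact hk
        simp [pvAdj, PySem.Dict.getD_eq_get?_getD, this]
      have hfilter : ((pvKeys grafo).filter (fun k => !decide (k ∈ PySem.Set.add vis atual))).length
          = ((pvKeys grafo).filter (fun k => !decide (k ∈ vis))).length := by
        congr 1
        apply List.filter_congr
        intro x hx
        have hne : x ≠ atual := fun h => hk (h ▸ hx)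
        simp [PySem.Set.mem_add, hne]
      rw [hadj, hfilter]
      exact Prod.Lex.right _ (by simp)

-- outer loop over the keys, threading (visitado, tamanhos)
def pvOuterA (grafo : List (Int × List Int)) (ks : List Int)
    (st : PySem.Set Int × List Int) : PySem.Set Int × List Int :=
  ks.foldl (fun st no =>
    if no ∈ st.1 then st
    else
      let r := pvDfsA grafo [no] st.1 0
      (r.2, st.2 ++ [r.1])) st

def componente_mais_frequente (grafo : List (Int × List Int)) : Int :=
  let tamanhos := (pvOuterA grafo (pvKeys grafo) (PySem.Set.empty, [])).2
  let frequencias := PySem.Dict.counter tamanhos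
  -- max() of an empty sequence raises ValueError in Python: grafo = [] is outside Pre_
  let max_frequencia := (PySem.List.max? frequencias.values (fun x => x)).getD 0
  let candidatos := (frequencias.items.filter (fun p => p.2 == max_frequencia)).map (·.1)
  (PySem.List.max? candidatos (fun x => x)).getD 0

-- ===== PORT B =====
-- one layer: for u in fronteira: for v in grafo[u]: if fresh, mark it, count it, queue it
-- state = (proxima, visitado, tamanho)
def pvLayerB (grafo : List (Int × List Int)) (fronteira : List Int)
    (st : List Int × PySem.Set Int × Int) : List Int × PySem.Set Int × Int :=
  fronteira.foldl (fun st u =>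
    (pvAdj grafo u).foldl (fun st v =>
      if v ∈ st.2.1 then st
      else (st.1 ++ [v], PySem.Set.add st.2.1 v, st.2.2 + 1)) st) st

-- while fronteira: … — fuel (#keys + 1) bounds the number of layers: under Pre_ every
-- non-final layer discovers at least one new key, so the fuel is never exhausted
def pvBfsB (grafo : List (Int × List Int)) (fuel : Nat) (fronteira : List Int)
    (vis : PySem.Set Int) (t : Int) : Int × PySem.Set Int :=
  match fuel with
  | 0 => (t, vis)
  | fuel + 1 =>
    match fronteira with
    | [] => (t, vis)
    | _ =>
      let r := pvLayerB grafo fronteira ([], vis, t)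
      pvBfsB grafo fuel r.1 r.2.1 r.2.2

def pvOuterB (grafo : List (Int × List Int)) (ks : List Int)
    (st : PySem.Set Int × List Int) : PySem.Set Int × List Int :=
  ks.foldl (fun st no =>
    if no ∈ st.1 then st
    else
      let r := pvBfsB grafo ((pvKeys grafo).length + 1) [no] (PySem.Set.add st.1 no) 1
      (r.2, st.2 ++ [r.1])) st

def componente_mais_frequente_alt (grafo : List (Int × List Int)) : Int :=
  let tamanhos := (pvOuterB grafo (pvKeys grafo) (PySem.Set.empty, [])).2
  let frequencias := tamanhos.foldl (fun (d : PySem.Dict Int Int) t =>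
    d.insert t (d.getD t 0 + 1)) PySem.Dict.empty
  let melhor := frequencias.items.foldl (fun (melhor : Option (Int × Int)) p =>
    match melhor with
    | none => some p
    | some (bt, bf) => if p.2 > bf ∨ (p.2 = bf ∧ p.1 > bt) then some p else some (bt, bf)) none
  -- melhor[0]: Python raises TypeError when melhor is still None (empty dict); outside Pre_
  match melhor with
  | some (bt, _) => bt
  | none => 0

-- ===== PRECONDITION & SPEC =====
-- Pre_ excludes exactly the inputs where the Python A raises: the empty graph
-- (ValueError from max()) and graphs with a neighbour that is not a key (KeyError).
def Pre_componente_mais_frequente (grafo : List (Int × List Int)) : Prop :=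
  grafo ≠ [] ∧ ∀ p ∈ grafo, ∀ v ∈ p.2, v ∈ (PySem.Dict.mk grafo).keys
instance (grafo : List (Int × List Int)) : Decidable (Pre_componente_mais_frequente grafo) := by
  unfold Pre_componente_mais_frequente; infer_instance

def pvWitness_componente_mais_frequente : (List (Int × List Int)) := [(1, [2]), (2, [1]), (3, [])]

def Spec_componente_mais_frequente (grafo : List (Int × List Int)) (out : Int) : Prop := out = componente_mais_frequente_alt grafo
instance (grafo : List (Int × List Int)) (out : Int) : Decidable (Spec_componente_mais_frequente grafo out) := by unfold Spec_componente_mais_frequente; infer_instance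

-- ===== CLAIM (what is proved, stated in full; the proofs are below) =====
def Claim_equal_componente_mais_frequente : Prop := ∀ (grafo : List (Int × List Int)), Dom_componente_mais_frequente grafo → Pre_componente_mais_frequente grafo → Spec_componente_mais_frequente grafo (componente_mais_frequente grafo)

-- ===== LEMMAS AND PROOFS =====

-- nodes reachable the way A's stack loop explores them: start anywhere on the stack,
-- expand only from nodes not yet visited
inductive pvRA (g : List (Int × List Int)) (vis : List Int) (S : List Int) : Int → Prop
  | base {y : Int} : y ∈ S → pvRA g vis S y
  | step {x y : Int} : pvRA g vis S x → x ∉ vis → y ∈ pvAdj g x → pvRA g vis S y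

-- nodes reachable the way B's frontier flood explores them: start on the frontier
-- (already marked), expand from anywhere, but only into unmarked nodes
inductive pvRB (g : List (Int × List Int)) (vis : List Int) (S : List Int) : Int → Prop
  | base {y : Int} : y ∈ S → pvRB g vis S y
  | step {x y : Int} : pvRB g vis S x → y ∈ pvAdj g x → y ∉ vis → pvRB g vis S y

theorem pvRA_nil (g : List (Int × List Int)) (vis : List Int) (y : Int) :
    ¬ pvRA g vis [] y := by
  intro h
  induction h with
  | base h => simp at h
  | step _ _ _ ih => exact ih

theorem pvRB_nil (g : List (Int × List Int)) (vis : List Int) (y : Int) :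
    ¬ pvRB g vis [] y := by
  intro h
  induction h with
  | base h => simp at h
  | step _ _ _ ih => exact ih

theorem pvRB_congr (g : List (Int × List Int)) (vis vis' S : List Int)
    (h : ∀ x, x ∈ vis ↔ x ∈ vis') (y : Int) :
    pvRB g vis S y ↔ pvRB g vis' S y := by
  constructor <;> intro hr
  · induction hr with
    | base hb => exact pvRB.base hb
    | step _ ha hv ih => exact pvRB.step ih ha (fun hm => hv ((h _).mpr hm))
  · induction hr with
    | base hb => exact pvRB.base hb
    | step _ ha hv ih => exact pvRB.step ih ha (fun hm => hv ((h _).mp hm))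

theorem pvRA_skip (g : List (Int × List Int)) (vis : List Int) (atual : Int)
    (rest : List Int) (h : atual ∈ vis) (y : Int) :
    (y ∈ vis ∨ pvRA g vis (atual :: rest) y) ↔ (y ∈ vis ∨ pvRA g vis rest y) := by
  constructor
  · rintro (hv | hr)
    · exact Or.inl hv
    · induction hr with
      | base hb =>
        rcases List.mem_cons.mp hb with rfl | hb'
        · exact Or.inl h
        · exact Or.inr (pvRA.base hb')
      | step hx hnv ha ih =>
        rcases ih with hv' | hr'
        · exact absurd hv' hnv
        · exact Or.inr (pvRA.step hr' hnv ha)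
  · rintro (hv | hr)
    · exact Or.inl hv
    · refine Or.inr ?_
      induction hr with
      | base hb => exact pvRA.base (List.mem_cons_of_mem _ hb)
      | step hx hnv ha ih => exact pvRA.step ih hnv ha

theorem pvRA_expand (g : List (Int × List Int)) (vis : List Int) (atual : Int)
    (rest : List Int) (h : atual ∉ vis) (y : Int) :
    (y ∈ vis ∨ pvRA g vis (atual :: rest) y) ↔
      (y ∈ PySem.Set.add vis atual ∨
        pvRA g (PySem.Set.add vis atual) ((pvAdj g atual).reverse ++ rest) y) := by
  constructor
  · rintro (hv | hr)
    · exact Or.inl ((PySem.Set.mem_add _ _ _).mpr (Or.inl hv))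
    · induction hr with
      | base hb =>
        rcases List.mem_cons.mp hb with rfl | hb'
        · exact Or.inl ((PySem.Set.mem_add _ _ _).mpr (Or.inr rfl))
        · exact Or.inr (pvRA.base (List.mem_append_right _ hb'))
      | step hx hnv ha ih =>
        rename_i x y
        have hRB : x = atual ∨ pvRA g (PySem.Set.add vis atual) ((pvAdj g atual).reverse ++ rest) x := by
          rcases ih with hv' | hr'
          · rcases (PySem.Set.mem_add _ _ _).mp hv' with hv'' | rfl
            · exact absurd hv'' hnv
            · exact Or.inl rfl
          · exact Or.inr hr'
        rcases hRB with rfl | hr'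
        · exact Or.inr (pvRA.base (List.mem_append_left _ (List.mem_reverse.mpr ha)))
        · by_cases hy : x = atual
          · subst hy
            exact Or.inr (pvRA.base (List.mem_append_left _ (List.mem_reverse.mpr ha)))
          · refine Or.inr (pvRA.step hr' ?_ ha)
            intro hm
            rcases (PySem.Set.mem_add _ _ _).mp hm with hv'' | rfl
            · exact hnv hv''
            · exact hy rfl
  · rintro (hv | hr)
    · rcases (PySem.Set.mem_add _ _ _).mp hv with hv' | rfl
      · exact Or.inl hv'
      · exact Or.inr (pvRA.base (List.mem_cons_self))
    · refine Or.inr ?_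
      induction hr with
      | base hb =>
        rcases List.mem_append.mp hb with hb' | hb'
        · exact pvRA.step (pvRA.base List.mem_cons_self) h (List.mem_reverse.mp hb')
        · exact pvRA.base (List.mem_cons_of_mem _ hb')
      | step hx hnv ha ih =>
        exact pvRA.step ih (fun hm => hnv ((PySem.Set.mem_add _ _ _).mpr (Or.inl hm))) ha

theorem pvRB_layer (g : List (Int × List Int)) (vis F fresh vis' : List Int)
    (hF : ∀ u ∈ F, u ∈ vis)
    (hfresh : ∀ y, y ∈ fresh ↔ y ∉ vis ∧ ∃ u ∈ F, y ∈ pvAdj g u)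
    (hvis' : ∀ y, y ∈ vis' ↔ y ∈ vis ∨ y ∈ fresh) (y : Int) :
    (y ∈ vis ∨ pvRB g vis F y) ↔ (y ∈ vis' ∨ pvRB g vis' fresh y) := by
  constructor
  · rintro (hv | hr)
    · exact Or.inl ((hvis' _).mpr (Or.inl hv))
    · induction hr with
      | base hb => exact Or.inl ((hvis' _).mpr (Or.inl (hF _ hb)))
      | step hx ha hnv ih =>
        rename_i x y
        have hRB : pvRB g vis' fresh x ∨ y ∈ fresh := by
          cases hx with
          | base hbF => exact Or.inr ((hfresh _).mpr ⟨hnv, _, hbF, ha⟩)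
          | step hx' ha' hnv' =>
            rcases ih with hv' | hr'
            · rcases (hvis' _).mp hv' with hv'' | hfr
              · exact absurd hv'' hnv'
              · exact Or.inl (pvRB.base hfr)
            · exact Or.inl hr'
        rcases hRB with hr' | hfr
        · by_cases hy : y ∈ vis'
          · exact Or.inl hy
          · exact Or.inr (pvRB.step hr' ha hy)
        · exact Or.inl ((hvis' _).mpr (Or.inr hfr))
  · rintro (hv | hr)
    · rcases (hvis' _).mp hv with hv' | hfr
      · exact Or.inl hv'
      · rcases (hfresh _).mp hfr with ⟨hnv, u, huF, ha⟩
        exact Or.inr (pvRB.step (pvRB.base huF) ha hnv)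
    · refine Or.inr ?_
      induction hr with
      | base hb =>
        rcases (hfresh _).mp hb with ⟨hnv, u, huF, ha⟩
        exact pvRB.step (pvRB.base huF) ha hnv
      | step hx ha hnv ih =>
        exact pvRB.step ih ha (fun hm => hnv ((hvis' _).mpr (Or.inl hm)))

-- the stack loop computes: the A-reachable set is added to visitado, tamanho counts it
theorem pvDfsA_spec (g : List (Int × List Int)) (stack : List Int) (vis : PySem.Set Int)
    (t : Int) (hnd : vis.Nodup) :
    (pvDfsA g stack vis t).2.Nodup ∧
    (∀ y, y ∈ (pvDfsA g stack vis t).2 ↔ y ∈ vis ∨ pvRA g vis stack y) ∧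
    (pvDfsA g stack vis t).1 = t + ((pvDfsA g stack vis t).2.length : Int) - (vis.length : Int) := by
  revert hnd
  fun_induction pvDfsA g stack vis t with
  | case1 vis t =>
    intro hnd
    refine ⟨hnd, fun y => ?_, by simp⟩
    simpa using (fun h => (pvRA_nil g vis y h).elim)
  | case2 vis t atual rest hmem ih =>
    intro hnd
    obtain ⟨h1, h2, h3⟩ := ih hnd
    exact ⟨h1, fun y => (h2 y).trans (pvRA_skip g vis atual rest hmem y).symm, h3⟩
  | case3 vis t atual rest hmem ih =>
    intro hnd
    have hnd' : (PySem.Set.add vis atual).Nodup := PySem.Set.nodup_add vis atual hnd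
    obtain ⟨h1, h2, h3⟩ := ih hnd'
    have hlen : (PySem.Set.add vis atual).length = vis.length + 1 := by
      rw [PySem.Set.add_of_not_mem hmem]
      simp
    refine ⟨h1, fun y => (h2 y).trans (pvRA_expand g vis atual rest hmem y).symm, ?_⟩
    rw [h3, hlen]
    push_cast
    ring

-- the inner 'for v in grafo[u]' loop of one layer
theorem pvInnerB_spec (_g : List (Int × List Int)) (ns : List Int)
    (st : List Int × PySem.Set Int × Int)
    (hnd : st.2.1.Nodup) (hndn : st.1.Nodup) (hsub : ∀ x ∈ st.1, x ∈ st.2.1) :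
    (ns.foldl (fun st v => if v ∈ st.2.1 then st
        else (st.1 ++ [v], PySem.Set.add st.2.1 v, st.2.2 + 1)) st).2.1.Nodup ∧
    (ns.foldl (fun st v => if v ∈ st.2.1 then st
        else (st.1 ++ [v], PySem.Set.add st.2.1 v, st.2.2 + 1)) st).1.Nodup ∧
    (∀ x ∈ (ns.foldl (fun st v => if v ∈ st.2.1 then st
        else (st.1 ++ [v], PySem.Set.add st.2.1 v, st.2.2 + 1)) st).1,
      x ∈ (ns.foldl (fun st v => if v ∈ st.2.1 then st
        else (st.1 ++ [v], PySem.Set.add st.2.1 v, st.2.2 + 1)) st).2.1) ∧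
    (∀ y, y ∈ (ns.foldl (fun st v => if v ∈ st.2.1 then st
        else (st.1 ++ [v], PySem.Set.add st.2.1 v, st.2.2 + 1)) st).2.1 ↔ y ∈ st.2.1 ∨ y ∈ ns) ∧
    (∀ y, y ∈ (ns.foldl (fun st v => if v ∈ st.2.1 then st
        else (st.1 ++ [v], PySem.Set.add st.2.1 v, st.2.2 + 1)) st).1 ↔
        y ∈ st.1 ∨ (y ∉ st.2.1 ∧ y ∈ ns)) ∧
    (ns.foldl (fun st v => if v ∈ st.2.1 then st
        else (st.1 ++ [v], PySem.Set.add st.2.1 v, st.2.2 + 1)) st).2.2 =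
      st.2.2 + (((ns.foldl (fun st v => if v ∈ st.2.1 then st
        else (st.1 ++ [v], PySem.Set.add st.2.1 v, st.2.2 + 1)) st).2.1.length : Int)
        - (st.2.1.length : Int)) := by
  induction ns generalizing st with
  | nil =>
    refine ⟨hnd, hndn, hsub, by simp, by simp, by simp⟩
  | cons v ns ih =>
    by_cases hv : v ∈ st.2.1
    · obtain ⟨h1, h2, h3, h4, h5, h6⟩ := ih st hnd hndn hsub
      simp only [List.foldl_cons, if_pos hv]
      refine ⟨h1, h2, h3, fun y => (h4 y).trans ?_, fun y => (h5 y).trans ?_, h6⟩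
      · constructor
        · rintro (h | h)
          · exact Or.inl h
          · exact Or.inr (List.mem_cons_of_mem _ h)
        · rintro (h | h)
          · exact Or.inl h
          · rcases List.mem_cons.mp h with rfl | h'
            · exact Or.inl hv
            · exact Or.inr h'
      · constructor
        · rintro (h | ⟨hn, hm⟩)
          · exact Or.inl h
          · exact Or.inr ⟨hn, List.mem_cons_of_mem _ hm⟩
        · rintro (h | ⟨hn, hm⟩)
          · exact Or.inl h
          · rcases List.mem_cons.mp hm with rfl | h'
            · exact absurd hv hn
            · exact Or.inr ⟨hn, h'⟩
    · have hnd' : (PySem.Set.add st.2.1 v).Nodup := PySem.Set.nodup_add _ _ hnd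
      have hndn' : (st.1 ++ [v]).Nodup := by
        rw [List.nodup_append]
        refine ⟨hndn, List.nodup_singleton _, ?_⟩
        intro x hx b hb
        rw [List.mem_singleton] at hb
        subst hb
        intro hxb
        subst hxb
        exact hv (hsub x hx)
      have hsub' : ∀ x ∈ st.1 ++ [v], x ∈ PySem.Set.add st.2.1 v := by
        intro x hx
        rcases List.mem_append.mp hx with h | h
        · exact (PySem.Set.mem_add _ _ _).mpr (Or.inl (hsub x h))
        · exact (PySem.Set.mem_add _ _ _).mpr (Or.inr (by simpa using h))
      obtain ⟨h1, h2, h3, h4, h5, h6⟩ := ih (st.1 ++ [v], PySem.Set.add st.2.1 v, st.2.2 + 1) hnd' hndn' hsub'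
      simp only [List.foldl_cons, if_neg hv]
      have hlen : (PySem.Set.add st.2.1 v).length = st.2.1.length + 1 := by
        rw [PySem.Set.add_of_not_mem hv]
        simp
      refine ⟨h1, h2, h3, fun y => (h4 y).trans ?_, fun y => (h5 y).trans ?_, ?_⟩
      · simp only [PySem.Set.mem_add _ _ _]
        constructor
        · rintro ((h | rfl) | h)
          · exact Or.inl h
          · exact Or.inr List.mem_cons_self
          · exact Or.inr (List.mem_cons_of_mem _ h)
        · rintro (h | h)
          · exact Or.inl (Or.inl h)
          · rcases List.mem_cons.mp h with rfl | h'
            · exact Or.inl (Or.inr rfl)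
            · exact Or.inr h'
      · constructor
        · rintro (h | ⟨hn, hm⟩)
          · rcases List.mem_append.mp h with h' | h'
            · exact Or.inl h'
            · rw [List.mem_singleton] at h'
              subst h'
              exact Or.inr ⟨hv, List.mem_cons_self⟩
          · refine Or.inr ⟨fun hm' => hn ((PySem.Set.mem_add _ _ _).mpr (Or.inl hm')), List.mem_cons_of_mem _ hm⟩
        · rintro (h | ⟨hn, hm⟩)
          · exact Or.inl (List.mem_append_left _ h)
          · rcases List.mem_cons.mp hm with rfl | h'
            · exact Or.inl (List.mem_append_right _ List.mem_cons_self)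
            · by_cases hyv : y = v
              · exact Or.inl (List.mem_append_right _ (by simp [hyv]))
              · refine Or.inr ⟨?_, h'⟩
                intro hm'
                rcases (PySem.Set.mem_add _ _ _).mp hm' with h'' | h''
                · exact hn h''
                · exact hyv h''
      · rw [h6, hlen]
        push_cast
        ring

-- one frontier layer: visitado gains the neighbours of the frontier, proxima collects
-- exactly the fresh ones, tamanho counts them
theorem pvLayerB_spec (g : List (Int × List Int)) (F : List Int)
    (st : List Int × PySem.Set Int × Int)
    (hnd : st.2.1.Nodup) (hndn : st.1.Nodup) (hsub : ∀ x ∈ st.1, x ∈ st.2.1) :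
    (pvLayerB g F st).2.1.Nodup ∧ (pvLayerB g F st).1.Nodup ∧
    (∀ x ∈ (pvLayerB g F st).1, x ∈ (pvLayerB g F st).2.1) ∧
    (∀ y, y ∈ (pvLayerB g F st).2.1 ↔ y ∈ st.2.1 ∨ ∃ u ∈ F, y ∈ pvAdj g u) ∧
    (∀ y, y ∈ (pvLayerB g F st).1 ↔ y ∈ st.1 ∨ (y ∉ st.2.1 ∧ ∃ u ∈ F, y ∈ pvAdj g u)) ∧
    (pvLayerB g F st).2.2 = st.2.2 + (((pvLayerB g F st).2.1.length : Int) - (st.2.1.length : Int)) := by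
  induction F generalizing st with
  | nil => exact ⟨hnd, hndn, hsub, by simp [pvLayerB], by simp [pvLayerB], by simp [pvLayerB]⟩
  | cons u F ih =>
    obtain ⟨i1, i2, i3, i4, i5, i6⟩ := pvInnerB_spec g (pvAdj g u) st hnd hndn hsub
    obtain ⟨l1, l2, l3, l4, l5, l6⟩ := ih _ i1 i2 i3
    have hunf : pvLayerB g (u :: F) st
        = pvLayerB g F ((pvAdj g u).foldl (fun st v => if v ∈ st.2.1 then st
            else (st.1 ++ [v], PySem.Set.add st.2.1 v, st.2.2 + 1)) st) := by
      simp [pvLayerB]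
    rw [hunf]
    refine ⟨l1, l2, l3, fun y => (l4 y).trans ?_, fun y => (l5 y).trans ?_, ?_⟩
    · constructor
      · rintro (hm | ⟨u', hu', ha⟩)
        · rcases (i4 y).mp hm with hm' | hm'
          · exact Or.inl hm'
          · exact Or.inr ⟨u, List.mem_cons_self, hm'⟩
        · exact Or.inr ⟨u', List.mem_cons_of_mem _ hu', ha⟩
      · rintro (hm | ⟨u', hu', ha⟩)
        · exact Or.inl ((i4 y).mpr (Or.inl hm))
        · rcases List.mem_cons.mp hu' with rfl | hu''
          · exact Or.inl ((i4 y).mpr (Or.inr ha))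
          · exact Or.inr ⟨u', hu'', ha⟩
    · constructor
      · rintro (hm | ⟨hn, u', hu', ha⟩)
        · rcases (i5 y).mp hm with hm' | ⟨hn', ha'⟩
          · exact Or.inl hm'
          · exact Or.inr ⟨hn', u, List.mem_cons_self, ha'⟩
        · have hn' : y ∉ st.2.1 := fun hm' => hn ((i4 y).mpr (Or.inl hm'))
          exact Or.inr ⟨hn', u', List.mem_cons_of_mem _ hu', ha⟩
      · rintro (hm | ⟨hn, u', hu', ha⟩)
        · exact Or.inl ((i5 y).mpr (Or.inl hm))
        · rcases List.mem_cons.mp hu' with rfl | hu''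
          · exact Or.inl ((i5 y).mpr (Or.inr ⟨hn, ha⟩))
          · by_cases hadju : y ∈ pvAdj g u
            · exact Or.inl ((i5 y).mpr (Or.inr ⟨hn, hadju⟩))
            · refine Or.inr ⟨?_, u', hu'', ha⟩
              intro hm'
              rcases (i4 y).mp hm' with hm'' | hm''
              · exact hn hm''
              · exact hadju hm''
    · rw [l6, i6]
      ring

theorem pvBfsB_nil (g : List (Int × List Int)) (fuel : Nat) (vis : PySem.Set Int) (t : Int) :
    pvBfsB g fuel [] vis t = (t, vis) := by
  cases fuel <;> rfl

-- strictly fewer unvisited keys once some key entered visitado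
theorem pvFilter_length_lt (K vis vis' : List Int) (a : Int)
    (hmono : ∀ x ∈ vis, x ∈ vis') (hK : a ∈ K) (ha : a ∉ vis) (ha' : a ∈ vis') :
    (K.filter (fun k => !decide (k ∈ vis'))).length
      < (K.filter (fun k => !decide (k ∈ vis))).length := by
  have hsub : (K.filter (fun k => !decide (k ∈ vis'))).Sublist
      (K.filter (fun k => !decide (k ∈ vis))) := by
    apply List.monotone_filter_right
    intro x hx
    simp only [Bool.not_eq_eq_eq_not, Bool.not_true, decide_eq_false_iff_not] at *
    exact fun h => hx (hmono x h)
  rcases hsub.length_le.lt_or_eq with h | h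
  · exact h
  · exfalso
    have heq := hsub.eq_of_length h
    have ha2 : a ∈ K.filter (fun k => !decide (k ∈ vis)) := by
      simp [List.mem_filter, hK, ha]
    rw [← heq] at ha2
    simp [List.mem_filter, ha'] at ha2

-- the frontier flood computes: the B-reachable set is added to visitado, tamanho counts it
theorem pvBfsB_spec (g : List (Int × List Int)) (fuel : Nat) (F : List Int)
    (vis : PySem.Set Int) (t : Int)
    (hadjK : ∀ x y, y ∈ pvAdj g x → y ∈ pvKeys g)
    (hnd : vis.Nodup) (hF : ∀ u ∈ F, u ∈ vis)
    (hfuel : ((pvKeys g).filter (fun k => !decide (k ∈ vis))).length + 1 ≤ fuel) :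
    (pvBfsB g fuel F vis t).2.Nodup ∧
    (∀ y, y ∈ (pvBfsB g fuel F vis t).2 ↔ y ∈ vis ∨ pvRB g vis F y) ∧
    (pvBfsB g fuel F vis t).1 = t + ((pvBfsB g fuel F vis t).2.length : Int) - (vis.length : Int) := by
  revert hnd hF hfuel
  induction fuel generalizing F vis t with
  | zero =>
    intro hnd hF hfuel
    omega
  | succ fuel ih =>
    intro hnd hF hfuel
    cases F with
    | nil =>
      rw [pvBfsB_nil]
      refine ⟨hnd, fun y => ?_, by simp⟩
      simpa using (fun h => (pvRB_nil g vis y h).elim)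
    | cons f F' =>
      have hred : pvBfsB g (fuel + 1) (f :: F') vis t
          = pvBfsB g fuel (pvLayerB g (f :: F') ([], vis, t)).1
              (pvLayerB g (f :: F') ([], vis, t)).2.1 (pvLayerB g (f :: F') ([], vis, t)).2.2 := rfl
      obtain ⟨L1, L2, L3, L4, L5, L6⟩ := pvLayerB_spec g (f :: F') ([], vis, t) hnd
        (List.nodup_nil) (by simp)
      set fresh := (pvLayerB g (f :: F') ([], vis, t)).1 with hfr
      set vis' := (pvLayerB g (f :: F') ([], vis, t)).2.1 with hv'
      set t' := (pvLayerB g (f :: F') ([], vis, t)).2.2 with ht'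
      have hfresh : ∀ y, y ∈ fresh ↔ y ∉ vis ∧ ∃ u ∈ f :: F', y ∈ pvAdj g u := by
        intro y
        exact (L5 y).trans (by simp)
      have hvis'2 : ∀ y, y ∈ vis' ↔ y ∈ vis ∨ y ∈ fresh := by
        intro y
        rw [L4 y, hfresh y]
        by_cases hy : y ∈ vis <;> simp [hy]
      have hlayer := fun y => pvRB_layer g vis (f :: F') fresh vis' hF hfresh hvis'2 y
      rw [hred]
      by_cases hfe : fresh = []
      · rw [hfe] at hlayer
        rw [hfe, pvBfsB_nil]
        refine ⟨L1, fun y => ?_, by rw [L6]; push_cast; ring⟩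
        constructor
        · intro h
          exact (hlayer y).mpr (Or.inl h)
        · intro h
          rcases (hlayer y).mp h with h' | h'
          · exact h'
          · exact absurd h' (pvRB_nil _ _ _)
      · obtain ⟨k, hkfresh⟩ := List.exists_mem_of_ne_nil fresh hfe
        obtain ⟨hknv, u, hu, hka⟩ := (hfresh k).mp hkfresh
        have hkK : k ∈ pvKeys g := hadjK u k hka
        have hkv' : k ∈ vis' := L3 k hkfresh
        have hmono : ∀ x ∈ vis, x ∈ vis' := fun x hx => (hvis'2 x).mpr (Or.inl hx)
        have hlt := pvFilter_length_lt (pvKeys g) vis vis' k hmono hkK hknv hkv'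
        obtain ⟨f1, f2, f3⟩ := ih fresh vis' t' L1 L3 (by omega)
        refine ⟨f1, fun y => ?_, ?_⟩
        · exact (f2 y).trans (hlayer y).symm
        · rw [f3, L6]
          push_cast
          ring

-- starting a component: A explores from the unvisited node, B marks it first
theorem pvBridge (g : List (Int × List Int)) (vis : List Int) (no : Int) (h : no ∉ vis)
    (y : Int) :
    (y ∈ vis ∨ pvRA g vis [no] y) ↔
      (y ∈ PySem.Set.add vis no ∨ pvRB g (PySem.Set.add vis no) [no] y) := by
  constructor
  · rintro (hv | hr)
    · exact Or.inl ((PySem.Set.mem_add _ _ _).mpr (Or.inl hv))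
    · induction hr with
      | base hb =>
        rcases List.mem_cons.mp hb with rfl | hb'
        · exact Or.inr (pvRB.base List.mem_cons_self)
        · simp at hb'
      | step hx hnv ha ih =>
        rename_i x y
        have hRB : pvRB g (PySem.Set.add vis no) [no] x := by
          rcases ih with hv' | hr'
          · rcases (PySem.Set.mem_add _ _ _).mp hv' with hv'' | rfl
            · exact absurd hv'' hnv
            · exact pvRB.base List.mem_cons_self
          · exact hr'
        by_cases hy : y ∈ PySem.Set.add vis no
        · exact Or.inl hy
        · exact Or.inr (pvRB.step hRB ha hy)
  · rintro (hv | hr)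
    · rcases (PySem.Set.mem_add _ _ _).mp hv with hv' | rfl
      · exact Or.inl hv'
      · exact Or.inr (pvRA.base List.mem_cons_self)
    · refine Or.inr ?_
      induction hr with
      | base hb =>
        rcases List.mem_cons.mp hb with rfl | hb'
        · exact pvRA.base List.mem_cons_self
        · simp at hb'
      | step hx ha hnv ih =>
        cases hx with
        | base hb =>
          rcases List.mem_cons.mp hb with rfl | hb'
          · exact pvRA.step ih h ha
          · simp at hb'
        | step hx' ha' hnv' =>
          exact pvRA.step ih (fun hm => hnv' ((PySem.Set.mem_add _ _ _).mpr (Or.inl hm))) ha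

theorem pvLength_eq_of_nodup (a b : List Int) (ha : a.Nodup) (hb : b.Nodup)
    (h : ∀ x, x ∈ a ↔ x ∈ b) : a.length = b.length := by
  exact ((List.perm_ext_iff_of_nodup ha hb).mpr h).length_eq

-- the two outer loops produce the same tamanhos list
theorem pvOuterAB (g : List (Int × List Int))
    (hadjK : ∀ x y, y ∈ pvAdj g x → y ∈ pvKeys g) (ks : List Int)
    (visA visB : PySem.Set Int) (tam : List Int)
    (hm : ∀ x, x ∈ visA ↔ x ∈ visB) (hlen : visA.length = visB.length)
    (hndA : visA.Nodup) (hndB : visB.Nodup) :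
    (pvOuterA g ks (visA, tam)).2 = (pvOuterB g ks (visB, tam)).2 := by
  revert hm hlen hndA hndB
  induction ks generalizing visA visB tam with
  | nil =>
    intro hm hlen hndA hndB
    simp [pvOuterA, pvOuterB]
  | cons no ks ih =>
    intro hm hlen hndA hndB
    by_cases hno : no ∈ visA
    · have hnoB : no ∈ visB := (hm no).mp hno
      have e1 : pvOuterA g (no :: ks) (visA, tam) = pvOuterA g ks (visA, tam) := by
        simp [pvOuterA, hno]
      have e2 : pvOuterB g (no :: ks) (visB, tam) = pvOuterB g ks (visB, tam) := by
        simp [pvOuterB, hnoB]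
      rw [e1, e2]
      exact ih visA visB tam hm hlen hndA hndB
    · have hnoB : no ∉ visB := fun h => hno ((hm no).mpr h)
      have e1 : pvOuterA g (no :: ks) (visA, tam)
          = pvOuterA g ks ((pvDfsA g [no] visA 0).2, tam ++ [(pvDfsA g [no] visA 0).1]) := by
        simp [pvOuterA, hno]
      have e2 : pvOuterB g (no :: ks) (visB, tam)
          = pvOuterB g ks ((pvBfsB g ((pvKeys g).length + 1) [no] (PySem.Set.add visB no) 1).2,
              tam ++ [(pvBfsB g ((pvKeys g).length + 1) [no] (PySem.Set.add visB no) 1).1]) := by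
        simp [pvOuterB, hnoB]
      obtain ⟨a1, a2, a3⟩ := pvDfsA_spec g [no] visA 0 hndA
      have hndB' : (PySem.Set.add visB no).Nodup := PySem.Set.nodup_add visB no hndB
      obtain ⟨b1, b2, b3⟩ := pvBfsB_spec g ((pvKeys g).length + 1) [no] (PySem.Set.add visB no) 1
        hadjK hndB'
        (by
          intro u hu
          rw [List.mem_singleton] at hu
          subst hu
          exact (PySem.Set.mem_add _ _ _).mpr (Or.inr rfl))
        (by
          have := List.length_filter_le (fun k => !decide (k ∈ PySem.Set.add visB no)) (pvKeys g)
          omega)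
      have hmemadd : ∀ y, y ∈ PySem.Set.add visA no ↔ y ∈ PySem.Set.add visB no := by
        intro y
        rw [PySem.Set.mem_add _ _ _, PySem.Set.mem_add _ _ _, hm y]
      have hmem : ∀ y, y ∈ (pvDfsA g [no] visA 0).2
          ↔ y ∈ (pvBfsB g ((pvKeys g).length + 1) [no] (PySem.Set.add visB no) 1).2 := by
        intro y
        rw [a2 y, b2 y]
        have hb := pvBridge g visA no hno y
        have hc := pvRB_congr g (PySem.Set.add visA no) (PySem.Set.add visB no) [no] hmemadd y
        rw [show (y ∈ visA ∨ pvRA g visA [no] y)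
            ↔ (y ∈ PySem.Set.add visA no ∨ pvRB g (PySem.Set.add visA no) [no] y) from hb,
          hmemadd y, hc]
      have hlen2 : (pvDfsA g [no] visA 0).2.length
          = (pvBfsB g ((pvKeys g).length + 1) [no] (PySem.Set.add visB no) 1).2.length :=
        pvLength_eq_of_nodup _ _ a1 b1 hmem
      have hladd : (PySem.Set.add visB no).length = visB.length + 1 := by
        rw [PySem.Set.add_of_not_mem hnoB]
        simp
      have hsz : (pvDfsA g [no] visA 0).1
          = (pvBfsB g ((pvKeys g).length + 1) [no] (PySem.Set.add visB no) 1).1 := by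
        rw [a3, b3, hladd, hlen2, hlen]
        push_cast
        ring
      rw [e1, e2, ← hsz]
      exact ih _ _ _ hmem hlen2 a1 b1

theorem pvOuterA_prefix (g : List (Int × List Int)) (ks : List Int)
    (vis : PySem.Set Int) (tam : List Int) :
    ∃ ext, (pvOuterA g ks (vis, tam)).2 = tam ++ ext := by
  induction ks generalizing vis tam with
  | nil => exact ⟨[], by simp [pvOuterA]⟩
  | cons no ks ih =>
    by_cases hno : no ∈ vis
    · have e1 : pvOuterA g (no :: ks) (vis, tam) = pvOuterA g ks (vis, tam) := by
        simp [pvOuterA, hno]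
      rw [e1]
      exact ih vis tam
    · have e1 : pvOuterA g (no :: ks) (vis, tam)
          = pvOuterA g ks ((pvDfsA g [no] vis 0).2, tam ++ [(pvDfsA g [no] vis 0).1]) := by
        simp [pvOuterA, hno]
      rw [e1]
      obtain ⟨ext, hext⟩ := ih (pvDfsA g [no] vis 0).2 (tam ++ [(pvDfsA g [no] vis 0).1])
      exact ⟨[(pvDfsA g [no] vis 0).1] ++ ext, by rw [hext, List.append_assoc]⟩

-- Python's (frequency, size) lexicographic order
def pvLexle (p q : Int × Int) : Prop := p.2 < q.2 ∨ (p.2 = q.2 ∧ p.1 ≤ q.1)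

def pvBStep (melhor : Option (Int × Int)) (p : Int × Int) : Option (Int × Int) :=
  match melhor with
  | none => some p
  | some (bt, bf) => if p.2 > bf ∨ (p.2 = bf ∧ p.1 > bt) then some p else some (bt, bf)

theorem pvLexle_refl (p : Int × Int) : pvLexle p p := Or.inr ⟨rfl, le_refl _⟩

theorem pvLexle_trans {p q r : Int × Int} (h1 : pvLexle p q) (h2 : pvLexle q r) :
    pvLexle p r := by
  unfold pvLexle at *
  omega

theorem pvBest_some (l : List (Int × Int)) (b : Int × Int) :
    ∃ r, l.foldl pvBStep (some b) = some r ∧ (r = b ∨ r ∈ l) ∧ pvLexle b r ∧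
      ∀ p ∈ l, pvLexle p r := by
  induction l generalizing b with
  | nil => exact ⟨b, rfl, Or.inl rfl, pvLexle_refl b, by simp⟩
  | cons p l ih =>
    simp only [List.foldl_cons]
    obtain ⟨bt, bf⟩ := b
    by_cases hc : p.2 > bf ∨ (p.2 = bf ∧ p.1 > bt)
    · have hstep : pvBStep (some (bt, bf)) p = some p := by
        simp only [pvBStep]
        rw [if_pos hc]
      rw [hstep]
      obtain ⟨r, heq, hmem, hbr, hall⟩ := ih p
      refine ⟨r, heq, ?_, ?_, ?_⟩
      · rcases hmem with rfl | h
        · exact Or.inr List.mem_cons_self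
        · exact Or.inr (List.mem_cons_of_mem _ h)
      · refine pvLexle_trans ?_ hbr
        unfold pvLexle
        simp only
        omega
      · intro q hq
        rcases List.mem_cons.mp hq with rfl | hq'
        · exact hbr
        · exact hall q hq'
    · have hstep : pvBStep (some (bt, bf)) p = some (bt, bf) := by
        simp only [pvBStep]
        rw [if_neg hc]
      rw [hstep]
      obtain ⟨r, heq, hmem, hbr, hall⟩ := ih (bt, bf)
      refine ⟨r, heq, ?_, hbr, ?_⟩
      · rcases hmem with rfl | h
        · exact Or.inl rfl
        · exact Or.inr (List.mem_cons_of_mem _ h)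
      · intro q hq
        rcases List.mem_cons.mp hq with rfl | hq'
        · refine pvLexle_trans ?_ hbr
          unfold pvLexle
          simp only
          omega
        · exact hall q hq'

-- A's Counter/max/filter/max tail equals B's single lexicographic pass, on any
-- non-empty items list
theorem pvTail_eq (l : List (Int × Int)) (hne : l ≠ []) :
    (PySem.List.max? ((l.filter (fun p => p.2 == (PySem.List.max? (l.map (·.2)) (fun x => x)).getD 0)).map (·.1)) (fun x => x)).getD 0
      = (match l.foldl pvBStep none with
         | some (bt, _) => bt
         | none => 0) := by
  obtain ⟨p0, l', rfl⟩ := List.exists_cons_of_ne_nil hne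
  rw [List.foldl_cons, show pvBStep none p0 = some p0 from rfl]
  obtain ⟨r, heq, hmem, hbr, hall⟩ := pvBest_some l' p0
  rw [heq]
  have hrmem : r ∈ p0 :: l' := by
    rcases hmem with rfl | h
    · exact List.mem_cons_self
    · exact List.mem_cons_of_mem _ h
  have hallc : ∀ q ∈ p0 :: l', pvLexle q r := by
    intro q hq
    rcases List.mem_cons.mp hq with rfl | h
    · exact hbr
    · exact hall q h
  set l := p0 :: l' with hl
  obtain ⟨m0, hm0⟩ : ∃ m0, PySem.List.max? (l.map (·.2)) (fun x => x) = some m0 := by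
    cases hmx : PySem.List.max? (l.map (·.2)) (fun x => x) with
    | none => exact absurd ((PySem.List.max?_eq_none_iff _ _).mp hmx) (by simp [hl])
    | some m => exact ⟨m, rfl⟩
  rw [hm0]
  simp only [Option.getD_some]
  have hm0max : ∀ p ∈ l, p.2 ≤ m0 := by
    intro p hp
    exact PySem.List.max?_isMax hm0 p.2 (List.mem_map_of_mem hp)
  obtain ⟨q0, hq0l, hq0⟩ := List.mem_map.mp (PySem.List.max?_mem hm0)
  have hq0f : q0 ∈ l.filter (fun p => p.2 == m0) :=
    List.mem_filter.mpr ⟨hq0l, by simp [hq0]⟩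
  have hcne : (l.filter (fun p => p.2 == m0)).map (·.1) ≠ [] := by
    intro h
    have hmm : q0.1 ∈ (l.filter (fun p => p.2 == m0)).map (·.1) := List.mem_map_of_mem hq0f
    rw [h] at hmm
    simp at hmm
  obtain ⟨a, ha⟩ : ∃ a, PySem.List.max? ((l.filter (fun p => p.2 == m0)).map (·.1)) (fun x => x) = some a := by
    cases hmx : PySem.List.max? ((l.filter (fun p => p.2 == m0)).map (·.1)) (fun x => x) with
    | none => exact absurd ((PySem.List.max?_eq_none_iff _ _).mp hmx) hcne
    | some m => exact ⟨m, rfl⟩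
  rw [ha]
  simp only [Option.getD_some]
  obtain ⟨pa, hpaf, hpa1⟩ := List.mem_map.mp (PySem.List.max?_mem ha)
  have hpal : pa ∈ l := (List.mem_filter.mp hpaf).1
  have hpa2 : pa.2 = m0 := by
    have := (List.mem_filter.mp hpaf).2
    simpa using this
  have hamax : ∀ p ∈ l, p.2 = m0 → p.1 ≤ a := by
    intro p hp hp2
    have hpf : p ∈ l.filter (fun p => p.2 == m0) := List.mem_filter.mpr ⟨hp, by simp [hp2]⟩
    exact PySem.List.max?_isMax ha p.1 (List.mem_map_of_mem hpf)
  have h1 : pvLexle pa r := hallc pa hpal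
  have h2 : r.2 ≤ m0 := hm0max r hrmem
  have hr2 : r.2 = m0 ∧ a ≤ r.1 := by
    unfold pvLexle at h1
    rw [hpa2, hpa1] at h1
    omega
  have hr1 : r.1 ≤ a := hamax r hrmem hr2.1
  obtain ⟨rt, rf⟩ := r
  simp only
  simp only at hr1 hr2
  omega


-- ===== VERDICT (by name: the statement is the Claim_ definition above) =====
theorem componente_mais_frequente_spec : Claim_equal_componente_mais_frequente := by
  intro grafo hdom hpre
  unfold Spec_componente_mais_frequente
  obtain ⟨hne, hclosed⟩ := hpre
  have hadjK : ∀ x y, y ∈ pvAdj grafo x → y ∈ pvKeys grafo := by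
    intro x y hy
    unfold pvAdj at hy
    rw [PySem.Dict.getD_eq_get?_getD] at hy
    cases hq : (PySem.Dict.mk grafo).get? x with
    | none =>
      rw [hq] at hy
      simp at hy
    | some vs =>
      rw [hq] at hy
      simp only [Option.getD_some] at hy
      have hmemg : (x, vs) ∈ grafo := PySem.Dict.mem_items_of_get?_eq_some _ hq
      exact hclosed (x, vs) hmemg y hy
  have houter : (pvOuterA grafo (pvKeys grafo) (PySem.Set.empty, [])).2
      = (pvOuterB grafo (pvKeys grafo) (PySem.Set.empty, [])).2 :=
    pvOuterAB grafo hadjK (pvKeys grafo) PySem.Set.empty PySem.Set.empty []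
      (fun x => Iff.rfl) rfl List.nodup_nil List.nodup_nil
  have hkeysne : pvKeys grafo ≠ [] := by
    unfold pvKeys
    intro h
    simp only [PySem.Dict.keys, List.map_eq_nil_iff] at h
    exact hne h
  have htamne : (pvOuterA grafo (pvKeys grafo) (PySem.Set.empty, [])).2 ≠ [] := by
    obtain ⟨k0, ks, hks⟩ := List.exists_cons_of_ne_nil hkeysne
    rw [hks]
    have e1 : pvOuterA grafo (k0 :: ks) (PySem.Set.empty, [])
        = pvOuterA grafo ks ((pvDfsA grafo [k0] PySem.Set.empty 0).2,
            [] ++ [(pvDfsA grafo [k0] PySem.Set.empty 0).1]) := by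
      simp [pvOuterA, PySem.Set.empty]
    rw [e1]
    obtain ⟨ext, hext⟩ := pvOuterA_prefix grafo ks _ _
    rw [hext]
    simp
  unfold componente_mais_frequente componente_mais_frequente_alt
  rw [← houter]
  set tam := (pvOuterA grafo (pvKeys grafo) (PySem.Set.empty, [])).2 with htam
  have hlne : (PySem.Dict.counter tam).items ≠ [] := by
    obtain ⟨t0, ts, hts⟩ := List.exists_cons_of_ne_nil htamne
    rw [PySem.Dict.items_counter]
    intro h
    simp only [List.map_eq_nil_iff] at h
    have : t0 ∈ PySem.Set.ofList tam := (PySem.Set.mem_ofList _ _).mpr (by rw [hts]; exact List.mem_cons_self)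
    rw [h] at this
    simp at this
  exact pvTail_eq (PySem.Dict.counter tam).items hlne
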